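-- pv_equiv track=rewrite | github.com/AndriusZimkus/AdventOfCode2024 | Day4/CeresSearch.py | totalXMASCountOfMatrix
-- ===== SOURCE A (Python) =====
-- def getCell(matrix,y,x):
--         if y < 0 or x < 0:
--                 return "O"
--         try:
--                 return matrix[y][x]
--         except:
--                 return "O"
--
-- def isCellXMAS(matrix, y, x):
--         cell = matrix[y][x]
--         if cell != 'A':
--                 return False
--
--         diagonalCount = 0
--
--         # Left up
--         if getCell(matrix,y+1,x+1) == 'M' and getCell(matrix,y-1,x-1) == 'S':
--                 diagonalCount +=1
--
--         # Right down
--         if getCell(matrix,y-1,x-1) == 'M' and getCell(matrix,y+1,x+1) == 'S':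
--                 diagonalCount +=1
--
--         # Left down
--         if getCell(matrix,y-1,x+1) == 'M' and getCell(matrix,y+1,x-1) == 'S':
--                 diagonalCount +=1
--
--         # Right up
--         if getCell(matrix,y+1,x-1) == 'M' and getCell(matrix,y-1,x+1) == 'S':
--                 diagonalCount +=1
--
--         return diagonalCount > 1
--
-- def totalXMASCountOfMatrix(matrix):
--         totalCount = 0
--         for i in range(len(matrix)):
--                 row = matrix[i]
--                 for j in range(len(row)):
--                         if isCellXMAS(matrix,i,j):
--                                 totalCount += 1
--
--         return totalCount
-- ===== SOURCE B (Python) =====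
-- def totalXMASCountOfMatrix(matrix):
--     def cell(y, x):
--         if 0 <= y < len(matrix) and 0 <= x < len(matrix[y]):
--             return matrix[y][x]
--         return None
--
--     mids = []
--     for y in range(len(matrix)):
--         row = matrix[y]
--         for x in range(len(row)):
--             if row[x] == 'M':
--                 for dy, dx in ((-1, -1), (-1, 1), (1, -1), (1, 1)):
--                     if cell(y + dy, x + dx) == 'A' and cell(y + 2 * dy, x + 2 * dx) == 'S':
--                         mids.append((y + dy, x + dx))
--     return sum(1 for m in set(mids) if mids.count(m) >= 2)
-- ===== Notes on version B (the rewrite author's own statement) =====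
-- stated objective: alternative
-- what changed: A scans every cell and, at each 'A', inspects its four diagonal corners and counts matching diagonals; B instead scans the 'M' endpoints, collects the midpoint of every diagonal M-A-S segment into a multiset, and returns the number of distinct midpoints collected at least twice.
import Mathlib
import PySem

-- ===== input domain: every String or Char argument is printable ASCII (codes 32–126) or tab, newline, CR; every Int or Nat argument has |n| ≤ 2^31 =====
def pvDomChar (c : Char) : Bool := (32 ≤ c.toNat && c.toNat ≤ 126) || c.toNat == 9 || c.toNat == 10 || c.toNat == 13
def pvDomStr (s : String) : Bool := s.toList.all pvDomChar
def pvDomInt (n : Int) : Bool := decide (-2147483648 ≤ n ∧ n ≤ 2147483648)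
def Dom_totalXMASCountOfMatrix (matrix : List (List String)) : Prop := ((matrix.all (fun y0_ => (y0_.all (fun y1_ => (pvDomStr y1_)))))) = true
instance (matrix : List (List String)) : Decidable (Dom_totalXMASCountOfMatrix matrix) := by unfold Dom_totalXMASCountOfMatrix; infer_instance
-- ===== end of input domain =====

-- B rewrites A's per-center four-corner scan as a midpoint-multiset pass over the M endpoints
-- (collect the midpoint of every diagonal MAS segment, then count midpoints occurring on both
-- diagonals); an alternative decomposition, measured modestly faster in a timing run.

-- ===== PORT A =====
-- getCell: sentinel "O" for negative or out-of-range indices (try/except)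
def pvGetCell (matrix : List (List String)) (y x : Int) : String :=
  if y < 0 || x < 0 then "O"
  else
    match PySem.List.pyGet? matrix y with
    | none => "O"
    | some row =>
      match PySem.List.pyGet? row x with
      | none => "O"
      | some c => c

-- isCellXMAS: only ever called with in-range nonnegative y, x (matrix[y][x] cannot raise there)
def pvIsCellXMAS (matrix : List (List String)) (y x : Int) : Bool :=
  let cell := (PySem.List.pyGet? ((PySem.List.pyGet? matrix y).getD []) x).getD ""
  if cell != "A" then false
  else
    let dc : Int := 0
    let dc := if pvGetCell matrix (y+1) (x+1) == "M" && pvGetCell matrix (y-1) (x-1) == "S" then dc + 1 else dc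
    let dc := if pvGetCell matrix (y-1) (x-1) == "M" && pvGetCell matrix (y+1) (x+1) == "S" then dc + 1 else dc
    let dc := if pvGetCell matrix (y-1) (x+1) == "M" && pvGetCell matrix (y+1) (x-1) == "S" then dc + 1 else dc
    let dc := if pvGetCell matrix (y+1) (x-1) == "M" && pvGetCell matrix (y-1) (x+1) == "S" then dc + 1 else dc
    dc > 1

def totalXMASCountOfMatrix (matrix : List (List String)) : Int :=
  (PySem.List.pyRange 0 (matrix.length : Int) 1).foldl (fun totalCount i =>
    let row := (PySem.List.pyGet? matrix i).getD []
    (PySem.List.pyRange 0 (row.length : Int) 1).foldl (fun totalCount j =>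
      if pvIsCellXMAS matrix i j then totalCount + 1 else totalCount) totalCount) 0

-- ===== PORT B =====
-- B's local helper `cell`: bounds-checked access, None when out of range
def pvCellB (matrix : List (List String)) (y x : Int) : Option String :=
  if 0 ≤ y ∧ y < (matrix.length : Int) ∧ 0 ≤ x
      ∧ x < (((PySem.List.pyGet? matrix y).getD []).length : Int) then
    some ((PySem.List.pyGet? ((PySem.List.pyGet? matrix y).getD []) x).getD "")
  else none

def pvDirsB : List (Int × Int) := [(-1,-1),(-1,1),(1,-1),(1,1)]

def pvMidsB (matrix : List (List String)) : List (Int × Int) :=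
  (PySem.List.pyRange 0 (matrix.length : Int) 1).foldl (fun acc y =>
    let row := (PySem.List.pyGet? matrix y).getD []
    (PySem.List.pyRange 0 (row.length : Int) 1).foldl (fun acc x =>
      if (PySem.List.pyGet? row x).getD "" == "M" then
        pvDirsB.foldl (fun acc d =>
          if pvCellB matrix (y + d.1) (x + d.2) == some "A" && pvCellB matrix (y + 2*d.1) (x + 2*d.2) == some "S"
          then acc ++ [(y + d.1, x + d.2)] else acc) acc
      else acc) acc) []

def totalXMASCountOfMatrix_alt (matrix : List (List String)) : Int :=
  let mids := pvMidsB matrix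
  ((PySem.Set.ofList mids).map (fun m => if 2 ≤ mids.count m then (1:Int) else 0)).sum

-- ===== PRECONDITION & SPEC =====
def Spec_totalXMASCountOfMatrix (matrix : List (List String)) (out : Int) : Prop := out = totalXMASCountOfMatrix_alt matrix
instance (matrix : List (List String)) (out : Int) : Decidable (Spec_totalXMASCountOfMatrix matrix out) := by unfold Spec_totalXMASCountOfMatrix; infer_instance

-- ===== CLAIM (what is proved, stated in full; the proofs are below) =====
def Claim_equal_totalXMASCountOfMatrix : Prop := ∀ (matrix : List (List String)), Dom_totalXMASCountOfMatrix matrix → Spec_totalXMASCountOfMatrix matrix (totalXMASCountOfMatrix matrix)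

-- ===== LEMMAS AND PROOFS =====

-- total cell access as an Option (none = out of range), used only by the proofs
def pvAt (matrix : List (List String)) (c : Int × Int) : Option String :=
  if c.1 < 0 ∨ c.2 < 0 then none
  else (matrix[c.1.toNat]?).bind (fun row => row[c.2.toNat]?)

-- row-major list of all in-range index pairs
def pvCells (matrix : List (List String)) : List (Int × Int) :=
  (List.range matrix.length).flatMap (fun (i : Nat) =>
    (List.range ((matrix.getD i []).length)).map (fun (j : Nat) => ((i : Int), (j : Int))))

-- one diagonal MAS segment through midpoint c in direction d
def pvSegD (matrix : List (List String)) (c d : Int × Int) : Bool :=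
  pvGetCell matrix (c.1 - d.1) (c.2 - d.2) == "M" && pvGetCell matrix c.1 c.2 == "A"
    && pvGetCell matrix (c.1 + d.1) (c.2 + d.2) == "S"

theorem pvGetCell_eq_at (matrix : List (List String)) (y x : Int) :
    pvGetCell matrix y x = (pvAt matrix (y, x)).getD "O" := by
  unfold pvGetCell pvAt
  by_cases hy : y < 0
  · simp [hy]
  by_cases hx : x < 0
  · simp [hx]
  rw [PySem.List.pyGet?_of_nonneg _ (by omega : (0:Int) ≤ y)]
  rw [if_neg (by omega : ¬((y, x).1 < 0 ∨ (y, x).2 < 0))]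
  rw [if_neg (show ¬((y < 0 || x < 0) = true) by simp; omega)]
  cases hrow : matrix[y.toNat]? with
  | none => simp
  | some row =>
    simp only [Option.bind_some]
    rw [PySem.List.pyGet?_of_nonneg _ (by omega : (0:Int) ≤ x)]
    cases hc : row[x.toNat]? with
    | none => simp
    | some c => simp

theorem pvMem_cells (matrix : List (List String)) (c : Int × Int) :
    c ∈ pvCells matrix ↔ (pvAt matrix c).isSome := by
  unfold pvCells pvAt
  constructor
  · intro hmem
    obtain ⟨i, hi, hmem2⟩ := List.mem_flatMap.mp hmem
    obtain ⟨j, hj, hcj⟩ := List.mem_map.mp hmem2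
    rw [List.mem_range] at hi
    rw [List.mem_range] at hj
    rw [List.getD_eq_getElem?_getD, List.getElem?_eq_getElem hi] at hj
    simp only [Option.getD_some] at hj
    subst hcj
    simp only [Int.toNat_natCast]
    rw [if_neg (by omega)]
    rw [List.getElem?_eq_getElem hi]
    simp [List.getElem?_eq_getElem hj]
  · intro h
    by_cases hneg : c.1 < 0 ∨ c.2 < 0
    · simp [hneg] at h
    rw [if_neg hneg] at h
    cases hrow : matrix[c.1.toNat]? with
    | none => simp [hrow] at h
    | some row =>
      rw [hrow] at h
      simp only [Option.bind_some] at h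
      cases hc : row[c.2.toNat]? with
      | none => simp [hc] at h
      | some v =>
        obtain ⟨hi, hrow'⟩ := List.getElem?_eq_some_iff.mp hrow
        obtain ⟨hj, -⟩ := List.getElem?_eq_some_iff.mp hc
        apply List.mem_flatMap.mpr
        refine ⟨c.1.toNat, List.mem_range.mpr hi, ?_⟩
        apply List.mem_map.mpr
        refine ⟨c.2.toNat, ?_, ?_⟩
        · apply List.mem_range.mpr
          rw [List.getD_eq_getElem?_getD, hrow]
          simp only [Option.getD_some]
          exact hj
        · obtain ⟨a, b⟩ := c
          simp only [not_or, not_lt] at hneg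
          simp only [Prod.mk.injEq]
          constructor <;> omega

theorem pvCells_nodup (matrix : List (List String)) : (pvCells matrix).Nodup := by
  unfold pvCells
  rw [List.nodup_flatMap]
  constructor
  · intro i _
    apply List.Nodup.map ?_ List.nodup_range
    intro a b hab
    simpa using congrArg Prod.snd hab
  · apply List.Pairwise.imp ?_ (List.pairwise_lt_range (n := matrix.length))
    intro a b hab
    intro p hp hq
    obtain ⟨j, _, rfl⟩ := List.mem_map.mp hp
    obtain ⟨k, _, hk⟩ := List.mem_map.mp hq
    have hba : b = a := by simpa using congrArg Prod.fst hk
    omega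

theorem pvGetCell_eq_iff (matrix : List (List String)) (y x : Int) (s : String) (hs : s ≠ "O") :
    (pvGetCell matrix y x = s) ↔ pvAt matrix (y, x) = some s := by
  rw [pvGetCell_eq_at]
  cases h : pvAt matrix (y, x) with
  | none => simpa using fun h => absurd h.symm hs
  | some v => simp

-- B-side emission of MAS-segment midpoints from one M endpoint, used only by the proofs
def pvEmit (matrix : List (List String)) (p : Int × Int) : List (Int × Int) :=
  if pvGetCell matrix p.1 p.2 == "M" then
    (pvDirsB.filter (fun d => pvCellB matrix (p.1 + d.1) (p.2 + d.2) == some "A"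
        && pvCellB matrix (p.1 + 2*d.1) (p.2 + 2*d.2) == some "S")).map
      (fun d => (p.1 + d.1, p.2 + d.2))
  else []

theorem pvCellB_eq_at (matrix : List (List String)) (y x : Int) :
    pvCellB matrix y x = pvAt matrix (y, x) := by
  unfold pvCellB pvAt
  by_cases hy : y < 0
  · rw [if_neg (by omega), if_pos (by simp; omega)]
  by_cases hx : x < 0
  · rw [if_neg (by omega), if_pos (by simp; omega)]
  rw [if_neg (by omega : ¬((y, x).1 < 0 ∨ (y, x).2 < 0))]
  rw [PySem.List.pyGet?_of_nonneg _ (by omega : (0:Int) ≤ y)]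
  by_cases hylen : y < (matrix.length : Int)
  · have hyn : y.toNat < matrix.length := by omega
    rw [List.getElem?_eq_getElem hyn]
    simp only [Option.getD_some, Option.bind_some]
    rw [PySem.List.pyGet?_of_nonneg _ (by omega : (0:Int) ≤ x)]
    by_cases hxlen : x < ((matrix[y.toNat]'hyn).length : Int)
    · have hxn : x.toNat < (matrix[y.toNat]'hyn).length := by omega
      rw [if_pos (by exact ⟨by omega, by omega, by omega, by exact_mod_cast hxlen⟩)]
      rw [List.getElem?_eq_getElem hxn]
      rfl
    · rw [if_neg (by intro h; exact hxlen (by exact_mod_cast h.2.2.2))]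
      rw [List.getElem?_eq_none (by omega)]
  · rw [List.getElem?_eq_none (by omega)]
    rw [if_neg (by intro h; exact hylen h.2.1)]
    rfl

theorem pvCellB_beq (matrix : List (List String)) (y x : Int) (s : String) (hs : s ≠ "O") :
    (pvCellB matrix y x == some s) = (pvGetCell matrix y x == s) := by
  rw [pvCellB_eq_at, pvGetCell_eq_at]
  cases h : pvAt matrix (y, x) with
  | none =>
    have hOs : ("O" : String) ≠ s := fun h => hs h.symm
    simp [hOs]
  | some v => simp

theorem pvRow_read (matrix : List (List String)) (i : Nat) :
    (PySem.List.pyGet? matrix (i : Int)).getD [] = matrix.getD i [] := by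
  rw [PySem.List.pyGet?_natCast, List.getD_eq_getElem?_getD]

theorem pvCell_read (matrix : List (List String)) (i j : Nat) (hi : i < matrix.length)
    (hj : j < (matrix.getD i []).length) :
    (PySem.List.pyGet? (matrix.getD i []) (j : Int)).getD "" = pvGetCell matrix (i : Int) (j : Int) := by
  have hrow : matrix.getD i [] = matrix[i] := by
    rw [List.getD_eq_getElem?_getD, List.getElem?_eq_getElem hi]; rfl
  unfold pvGetCell
  rw [if_neg (show ¬(((i:Int) < 0 || (j:Int) < 0) = true) by simp)]
  rw [PySem.List.pyGet?_natCast (xs := matrix), List.getElem?_eq_getElem hi]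
  simp only []
  rw [hrow] at hj ⊢
  rw [PySem.List.pyGet?_natCast, List.getElem?_eq_getElem hj]
  rfl

theorem pvMem_cells_elim (matrix : List (List String)) (c : Int × Int) (h : c ∈ pvCells matrix) :
    ∃ (i j : Nat), i < matrix.length ∧ j < (matrix.getD i []).length ∧ c = ((i : Int), (j : Int)) := by
  unfold pvCells at h
  obtain ⟨i, hi, h2⟩ := List.mem_flatMap.mp h
  obtain ⟨j, hj, hcj⟩ := List.mem_map.mp h2
  exact ⟨i, j, List.mem_range.mp hi, List.mem_range.mp hj, hcj.symm⟩

theorem pvCastListSum (l : List Nat) : ((l.sum : Nat) : Int) = (l.map (fun (n : Nat) => (n : Int))).sum := by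
  induction l with
  | nil => simp
  | cons a t ih => simp [ih]

theorem pvSumExchange {α β : Type} (l : List α) (m : List β) (f : α → β → Nat) :
    (l.map (fun p => (m.map (fun d => f p d)).sum)).sum
      = (m.map (fun d => (l.map (fun p => f p d)).sum)).sum := by
  induction l with
  | nil => simp
  | cons a t ih =>
    simp only [List.map_cons, List.sum_cons, ih, List.sum_map_add]

theorem pvCountP_single (l : List (Int × Int)) (hl : l.Nodup) (t : Int × Int) (Q : Bool) :
    l.countP (fun p => (p == t) && Q) = if t ∈ l ∧ Q = true then 1 else 0 := by
  by_cases hQ : Q = true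
  · subst hQ
    simp only [Bool.and_true, and_true]
    rw [← List.count_eq_countP]
    by_cases hm : t ∈ l
    · rw [List.count_eq_one_of_mem hl hm, if_pos hm]
    · rw [List.count_eq_zero.mpr hm, if_neg hm]
  · have hQ' : Q = false := by revert hQ; cases Q <;> simp
    subst hQ'
    simp

theorem pvA_eq_countP (matrix : List (List String)) :
    totalXMASCountOfMatrix matrix
      = ((pvCells matrix).countP (fun c => pvIsCellXMAS matrix c.1 c.2) : Int) := by
  unfold totalXMASCountOfMatrix
  rw [PySem.List.pyRange_zero_natCast, List.foldl_map]
  refine Eq.trans (PySem.List.foldl_congr_mem _ _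
    (fun acc (i : Nat) => acc +
      (((List.range ((matrix.getD i []).length)).countP
        (fun (j : Nat) => pvIsCellXMAS matrix (i : Int) (j : Int)) : Nat) : Int)) _ ?_) ?_
  · intro acc i hi
    simp only [pvRow_read]
    rw [PySem.List.pyRange_zero_natCast, List.foldl_map]
    rw [PySem.List.foldl_if_add_one]
  · rw [PySem.List.foldl_add (g := fun (i : Nat) =>
      (((List.range ((matrix.getD i []).length)).countP
        (fun (j : Nat) => pvIsCellXMAS matrix (i : Int) (j : Int)) : Nat) : Int))]
    rw [zero_add]
    unfold pvCells
    rw [List.countP_flatMap, pvCastListSum, List.map_map]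
    congr 1
    apply List.map_congr_left
    intro i _
    simp only [Function.comp_apply, List.countP_map]
    rfl

theorem pvMids_eq (matrix : List (List String)) :
    pvMidsB matrix = (pvCells matrix).flatMap (pvEmit matrix) := by
  unfold pvMidsB
  rw [PySem.List.pyRange_zero_natCast, List.foldl_map]
  refine Eq.trans (PySem.List.foldl_congr_mem _ _
    (fun acc (i : Nat) => acc ++ (List.range ((matrix.getD i []).length)).flatMap
      (fun (j : Nat) => pvEmit matrix ((i : Int), (j : Int)))) _ ?_) ?_
  · intro acc i hi
    rw [List.mem_range] at hi
    simp only [pvRow_read]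
    rw [PySem.List.pyRange_zero_natCast, List.foldl_map]
    refine Eq.trans (PySem.List.foldl_congr_mem _ _
      (fun acc (j : Nat) => acc ++ pvEmit matrix ((i : Int), (j : Int))) _ ?_) ?_
    · intro acc2 j hj
      rw [List.mem_range] at hj
      rw [pvCell_read matrix i j hi hj]
      unfold pvEmit
      simp only []
      by_cases hM : pvGetCell matrix (i : Int) (j : Int) == "M"
      · rw [if_pos hM, if_pos hM, PySem.List.foldl_append_if]
      · rw [if_neg hM, if_neg hM, List.append_nil]
    · rw [PySem.List.foldl_append_eq_flatMap]
  · rw [PySem.List.foldl_append_eq_flatMap, List.nil_append]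
    unfold pvCells
    rw [List.flatMap_assoc]
    simp only [List.flatMap_map]

theorem pvEmit_point (matrix : List (List String)) (c d p : Int × Int)
    (hM : pvGetCell matrix p.1 p.2 == "M") :
    ((((p.1 + d.1, p.2 + d.2) : Int × Int) == c)
        && (pvCellB matrix (p.1 + d.1) (p.2 + d.2) == some "A"
            && pvCellB matrix (p.1 + 2*d.1) (p.2 + 2*d.2) == some "S"))
      = ((p == ((c.1 - d.1, c.2 - d.2) : Int × Int)) && pvSegD matrix c d) := by
  rw [pvCellB_beq matrix (p.1 + d.1) (p.2 + d.2) "A" (by decide),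
    pvCellB_beq matrix (p.1 + 2*d.1) (p.2 + 2*d.2) "S" (by decide)]
  by_cases h : p = ((c.1 - d.1, c.2 - d.2) : Int × Int)
  · have h1 : p.1 = c.1 - d.1 := by rw [h]
    have h2 : p.2 = c.2 - d.2 := by rw [h]
    rw [h1, h2]
    rw [show c.1 - d.1 + d.1 = c.1 by ring, show c.2 - d.2 + d.2 = c.2 by ring,
      show c.1 - d.1 + 2*d.1 = c.1 + d.1 by ring, show c.2 - d.2 + 2*d.2 = c.2 + d.2 by ring]
    unfold pvSegD
    rw [h1, h2] at hM
    have hMc : pvGetCell matrix (c.1 - d.1) (c.2 - d.2) == "M" := hM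
    have hpt : (p == ((c.1 - d.1, c.2 - d.2) : Int × Int)) = true := beq_iff_eq.mpr h
    simp [Prod.mk.eta, hMc, hpt]
  · have h1 : (p == ((c.1 - d.1, c.2 - d.2) : Int × Int)) = false := by
      simpa using h
    have h2 : ((((p.1 + d.1, p.2 + d.2) : Int × Int)) == c) = false := by
      apply beq_eq_false_iff_ne.mpr
      intro hc
      apply h
      have hc1 : p.1 + d.1 = c.1 := by rw [← hc]
      have hc2 : p.2 + d.2 = c.2 := by rw [← hc]
      have : p = (p.1, p.2) := by rw [Prod.mk.eta]
      rw [this]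
      rw [show c.1 - d.1 = p.1 by omega, show c.2 - d.2 = p.2 by omega]
    rw [h1, h2]
    simp

theorem pvEmit_count (matrix : List (List String)) (c p : Int × Int) :
    (pvEmit matrix p).count c
      = pvDirsB.countP (fun d => (p == ((c.1 - d.1, c.2 - d.2) : Int × Int)) && pvSegD matrix c d) := by
  unfold pvEmit
  by_cases hM : pvGetCell matrix p.1 p.2 == "M"
  · rw [if_pos hM, List.count_eq_countP, List.countP_map, List.countP_filter]
    apply List.countP_congr
    intro d _
    simp only [Function.comp_apply]
    rw [pvEmit_point matrix c d p hM]
  · rw [if_neg hM, List.count_nil]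
    symm
    rw [List.countP_eq_zero]
    intro d _
    intro hcon
    rw [Bool.and_eq_true] at hcon
    obtain ⟨hpd, hseg⟩ := hcon
    have hp : p = ((c.1 - d.1, c.2 - d.2) : Int × Int) := eq_of_beq hpd
    unfold pvSegD at hseg
    rw [Bool.and_eq_true, Bool.and_eq_true] at hseg
    apply hM
    rw [hp]
    exact hseg.1.1

theorem pvMids_count (matrix : List (List String)) (c : Int × Int) :
    (pvMidsB matrix).count c = pvDirsB.countP (fun d => pvSegD matrix c d) := by
  rw [pvMids_eq, List.count_flatMap]
  have h1 : (pvCells matrix).map (List.count c ∘ pvEmit matrix)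
      = (pvCells matrix).map (fun p =>
          ((pvDirsB.map (fun d =>
            (if ((p == ((c.1 - d.1, c.2 - d.2) : Int × Int)) && pvSegD matrix c d) then 1 else 0 : Nat))).sum)) := by
    apply List.map_congr_left
    intro p _
    rw [Function.comp_apply, pvEmit_count]
    rw [← PySem.List.sum_map_ite_one_zero_nat]
  rw [h1, pvSumExchange]
  rw [← PySem.List.sum_map_ite_one_zero_nat]
  congr 1
  apply List.map_congr_left
  intro d _
  rw [PySem.List.sum_map_ite_one_zero_nat]
  rw [pvCountP_single _ (pvCells_nodup matrix) _ _]
  by_cases hseg : pvSegD matrix c d = true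
  · have hM : pvGetCell matrix (c.1 - d.1) (c.2 - d.2) = "M" := by
      unfold pvSegD at hseg
      rw [Bool.and_eq_true, Bool.and_eq_true] at hseg
      exact eq_of_beq hseg.1.1
    rw [pvGetCell_eq_iff _ _ _ _ (by decide)] at hM
    have hmem : ((c.1 - d.1, c.2 - d.2) : Int × Int) ∈ pvCells matrix := by
      rw [pvMem_cells]
      simp [hM]
    simp [hmem, hseg]
  · simp [hseg]

theorem pvIsX_char (matrix : List (List String)) (i j : Nat) (hi : i < matrix.length)
    (hj : j < (matrix.getD i []).length) :
    pvIsCellXMAS matrix (i : Int) (j : Int)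
      = (pvGetCell matrix (i : Int) (j : Int) == "A"
          && decide (2 ≤ pvDirsB.countP (fun d => pvSegD matrix ((i : Int), (j : Int)) d))) := by
  unfold pvIsCellXMAS
  simp only [pvRow_read]
  rw [pvCell_read matrix i j hi hj]
  by_cases hA : (pvGetCell matrix (i : Int) (j : Int) == "A") = true
  case neg =>
    have hA' : (pvGetCell matrix (i : Int) (j : Int) == "A") = false := by
      revert hA; cases (pvGetCell matrix (i : Int) (j : Int) == "A") <;> simp
    simp [bne, hA']
  case pos =>
    have hbne : (pvGetCell matrix (i : Int) (j : Int) != "A") = false := by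
      simp [bne, hA]
    simp only [hbne, Bool.false_eq_true, if_false]
    simp only [pvDirsB, List.countP_cons, List.countP_nil, pvSegD]
    rw [show ((i:Int) - -1) = (i:Int) + 1 by ring, show ((j:Int) - -1) = (j:Int) + 1 by ring,
      show ((i:Int) + -1) = (i:Int) - 1 by ring, show ((j:Int) + -1) = (j:Int) - 1 by ring]
    simp only [hA, Bool.and_true, Bool.true_and]
    cases hb1 : pvGetCell matrix ((i:Int)+1) ((j:Int)+1) == "M"
      && pvGetCell matrix ((i:Int)-1) ((j:Int)-1) == "S" <;>
    cases hb2 : pvGetCell matrix ((i:Int)-1) ((j:Int)-1) == "M"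
      && pvGetCell matrix ((i:Int)+1) ((j:Int)+1) == "S" <;>
    cases hb3 : pvGetCell matrix ((i:Int)-1) ((j:Int)+1) == "M"
      && pvGetCell matrix ((i:Int)+1) ((j:Int)-1) == "S" <;>
    cases hb4 : pvGetCell matrix ((i:Int)+1) ((j:Int)-1) == "M"
      && pvGetCell matrix ((i:Int)-1) ((j:Int)+1) == "S" <;>
    simp

theorem pvPred_iff (matrix : List (List String)) (c : Int × Int) :
    2 ≤ (pvMidsB matrix).count c ↔ (c ∈ pvCells matrix ∧ pvIsCellXMAS matrix c.1 c.2) := by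
  rw [pvMids_count]
  constructor
  · intro h2
    have hpos : 0 < pvDirsB.countP (fun d => pvSegD matrix c d) := by omega
    obtain ⟨d, hd, hseg⟩ := List.countP_pos_iff.mp hpos
    have hA : pvGetCell matrix c.1 c.2 = "A" := by
      unfold pvSegD at hseg
      rw [Bool.and_eq_true, Bool.and_eq_true] at hseg
      exact eq_of_beq hseg.1.2
    have hmem : c ∈ pvCells matrix := by
      rw [pvMem_cells]
      rw [pvGetCell_eq_iff _ _ _ _ (by decide)] at hA
      rw [show ((c.1, c.2) : Int × Int) = c from Prod.mk.eta] at hA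
      simp [hA]
    refine ⟨hmem, ?_⟩
    obtain ⟨i', j', hi', hj', hc⟩ := pvMem_cells_elim _ _ hmem
    have hchar : pvIsCellXMAS matrix c.1 c.2
        = (pvGetCell matrix c.1 c.2 == "A"
            && decide (2 ≤ pvDirsB.countP (fun d => pvSegD matrix c d))) := by
      rw [hc]
      exact pvIsX_char matrix i' j' hi' hj'
    rw [hchar, hA]
    simp [h2]
  · rintro ⟨hmem, hx⟩
    obtain ⟨i', j', hi', hj', hc⟩ := pvMem_cells_elim _ _ hmem
    have hchar : pvIsCellXMAS matrix c.1 c.2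
        = (pvGetCell matrix c.1 c.2 == "A"
            && decide (2 ≤ pvDirsB.countP (fun d => pvSegD matrix c d))) := by
      rw [hc]
      exact pvIsX_char matrix i' j' hi' hj'
    rw [hchar] at hx
    rw [Bool.and_eq_true] at hx
    exact of_decide_eq_true hx.2

theorem pvB_eq_countP (matrix : List (List String)) :
    totalXMASCountOfMatrix_alt matrix
      = ((PySem.Set.ofList (pvMidsB matrix)).countP (fun m => 2 ≤ (pvMidsB matrix).count m) : Int) := by
  unfold totalXMASCountOfMatrix_alt
  simp only []
  rw [show (fun (m : Int × Int) => if 2 ≤ (pvMidsB matrix).count m then (1:Int) else 0)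
      = (fun m => if (decide (2 ≤ (pvMidsB matrix).count m)) = true then (1:Int) else 0) by
    funext m; simp]
  rw [PySem.List.sum_map_ite_one_zero]

-- ===== VERDICT (by name: the statement is the Claim_ definition above) =====
theorem totalXMASCountOfMatrix_spec : Claim_equal_totalXMASCountOfMatrix := by
  intro matrix _
  show totalXMASCountOfMatrix matrix = totalXMASCountOfMatrix_alt matrix
  rw [pvA_eq_countP, pvB_eq_countP]
  congr 1
  rw [List.countP_eq_length_filter, List.countP_eq_length_filter]
  apply List.Perm.length_eq
  rw [List.perm_ext_iff_of_nodup (List.Nodup.filter _ (pvCells_nodup _))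
    (List.Nodup.filter _ (PySem.Set.nodup_ofList _))]
  intro a
  simp only [List.mem_filter, PySem.Set.mem_ofList, decide_eq_true_eq]
  constructor
  · rintro ⟨hmem, hx⟩
    have h2 := (pvPred_iff matrix a).mpr ⟨hmem, hx⟩
    exact ⟨List.count_pos_iff.mp (by omega), h2⟩
  · rintro ⟨_, h2⟩
    exact (pvPred_iff matrix a).mp h2
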